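-- pv_equiv track=rewrite | github.com/szabomarcel/Iskola | Python/7.26/6.py | szamol_nem
-- ===== SOURCE A (Python) =====
-- def szamol_nem(szoveg):
--    szavak = szoveg.split(" ")
--    szam = 0
--    done = False
--    for szo in szavak:
--       if not done:
--          if szo != "nem":
--             szam += 1
--          else:
--             szam += 1
--             done = True
--    return szam
-- ===== SOURCE B (Python) =====
-- def szamol_nem(szoveg):
--     def elso(szavak):
--         if not szavak:
--             return 0
--         if szavak[0] == "nem":
--             return 1
--         return 1 + elso(szavak[1:])
--     return elso(szoveg.split(" "))
-- ===== Notes on version B (the rewrite author's own statement) =====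
-- stated objective: alternative
-- what changed: The flag-driven accumulator loop over the whole word list is replaced by a structural recursion on the list that terminates at the first "nem" (1 at the sentinel, 1 + recurse otherwise), maintaining no counter or done-flag.
import Mathlib
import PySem

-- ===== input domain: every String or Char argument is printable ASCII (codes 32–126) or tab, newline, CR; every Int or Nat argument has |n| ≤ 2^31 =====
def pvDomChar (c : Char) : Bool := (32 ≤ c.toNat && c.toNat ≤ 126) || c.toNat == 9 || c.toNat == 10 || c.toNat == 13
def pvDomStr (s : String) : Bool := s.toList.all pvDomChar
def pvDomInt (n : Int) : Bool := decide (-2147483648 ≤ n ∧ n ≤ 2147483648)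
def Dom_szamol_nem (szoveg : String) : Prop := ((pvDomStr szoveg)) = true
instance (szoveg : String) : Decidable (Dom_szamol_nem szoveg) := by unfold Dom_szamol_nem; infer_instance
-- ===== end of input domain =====

-- B replaces A's flag-driven accumulator loop by a structural recursion stopping at the first "nem"; same values everywhere (objective: alternative).

-- ===== PORT A =====
-- A: counts words in a flag-driven loop, stopping the count after the first "nem" (inclusive).
-- loop body of A, on the state (szam, done)
def pvStepA (st : Int × Bool) (szo : String) : Int × Bool :=
  if st.2 = false then
    if szo ≠ "nem" then (st.1 + 1, st.2)
    else (st.1 + 1, true)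
  else st

def szamol_nem (szoveg : String) : Int :=
  let szavak := (PySem.Str.split? szoveg " ").getD []
  (szavak.foldl pvStepA ((0 : Int), false)).1

-- ===== PORT B =====
-- B's helper 'elso': structural recursion on the word list, stops at "nem".
def pvElso : List String → Int
  | [] => 0
  | h :: t => if h = "nem" then 1 else 1 + pvElso t

def szamol_nem_alt (szoveg : String) : Int :=
  pvElso ((PySem.Str.split? szoveg " ").getD [])

-- ===== PRECONDITION & SPEC =====
def Spec_szamol_nem (szoveg : String) (out : Int) : Prop := out = szamol_nem_alt szoveg
instance (szoveg : String) (out : Int) : Decidable (Spec_szamol_nem szoveg out) := by unfold Spec_szamol_nem; infer_instance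

-- ===== CLAIM (what is proved, stated in full; the proofs are below) =====
def Claim_equal_szamol_nem : Prop := ∀ (szoveg : String), Dom_szamol_nem szoveg → Spec_szamol_nem szoveg (szamol_nem szoveg)

-- ===== LEMMAS AND PROOFS =====

-- once done is set, A's fold leaves the state unchanged
theorem pv_fold_done (l : List String) (n : Int) :
    l.foldl pvStepA (n, true) = (n, true) := by
  induction l with
  | nil => rfl
  | cons h t ih => simpa [pvStepA] using ih

-- the invariant: A's fold from (n, false) adds exactly pvElso l
theorem pv_fold_eq (l : List String) (n : Int) :
    (l.foldl pvStepA (n, false)).1 = n + pvElso l := by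
  induction l generalizing n with
  | nil => simp [pvElso]
  | cons h t ih =>
    rw [List.foldl_cons]
    by_cases hh : h = "nem"
    · subst hh
      have hstep : pvStepA (n, false) "nem" = (n + 1, true) := by simp [pvStepA]
      rw [hstep, pv_fold_done]
      simp [pvElso]
    · have hstep : pvStepA (n, false) h = (n + 1, false) := by simp [pvStepA, hh]
      rw [hstep, ih]
      simp [pvElso, hh]
      ring

-- ===== VERDICT (by name: the statement is the Claim_ definition above) =====
theorem szamol_nem_spec : Claim_equal_szamol_nem := by
  intro szoveg _
  unfold Spec_szamol_nem szamol_nem szamol_nem_alt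
  simp [pv_fold_eq]
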